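-- pv_equiv track=rewrite | github.com/shananilen/COHDCN181F-006 | Assigment 01 - xxd - COHDCN181F-006.py.py | func
-- ===== SOURCE A (Python) =====
-- def func(text):                                 #Convert ASCII strings to hex values
--         string=""
--         for i in str(text):
--                 h=str(hex(ord(i)))[2:]
--                 string+=h
--
--         count=0
--         string2=""
--         for j in str(string):
--                 count+=1
--                 string2+=j
--                 if count%4==0:
--                         string2+=" "
--         return string2
-- ===== SOURCE B (Python) =====
-- def func(text):
--     hexstr = ''.join(format(ord(c), 'x') for c in str(text))
--     pieces = []
--     for i in range(0, len(hexstr), 4):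
--         chunk = hexstr[i:i+4]
--         pieces.append(chunk + ' ' if len(chunk) == 4 else chunk)
--     return ''.join(pieces)
-- ===== Notes on version B (the rewrite author's own statement) =====
-- stated objective: alternative
-- what changed: B joins the per-char hex digits in one pass and then walks the hex string in stride-4 slices, appending a space to each full 4-char chunk, instead of A's per-character modulo counter and repeated string concatenation.
import Mathlib
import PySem

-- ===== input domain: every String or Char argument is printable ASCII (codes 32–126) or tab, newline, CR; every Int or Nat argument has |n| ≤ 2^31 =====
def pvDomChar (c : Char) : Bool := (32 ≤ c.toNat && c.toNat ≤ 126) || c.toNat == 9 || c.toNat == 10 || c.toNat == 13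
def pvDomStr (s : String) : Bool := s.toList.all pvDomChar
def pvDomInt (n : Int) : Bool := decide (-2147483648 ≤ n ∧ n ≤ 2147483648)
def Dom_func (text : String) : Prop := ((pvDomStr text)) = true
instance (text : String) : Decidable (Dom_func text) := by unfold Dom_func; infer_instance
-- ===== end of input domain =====

-- B groups the hex string by stride-4 slicing instead of A's per-character modulo counter; same output, no speed claim proved.

-- hex(ord(c))[2:] : unpadded lowercase hex digits of the code point (shared primitive of both ports)
def hexOf (c : Char) : List Char := Nat.toDigits 16 c.toNat

-- ===== PORT A =====
def func (text : String) : String :=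
  let string : List Char := text.toList.foldl (fun acc i => acc ++ hexOf i) []
  let st := string.foldl (fun (st : Nat × List Char) j =>
      (st.1 + 1, if (st.1 + 1) % 4 = 0 then st.2 ++ [j] ++ [' '] else st.2 ++ [j])) (0, [])
  String.mk st.2

-- ===== PORT B =====
def chunkGroups (l : List Char) : List Char :=
  match l with
  | [] => []
  | x :: xs =>
    let c := x :: xs.take 3
    (if c.length = 4 then c ++ [' '] else c) ++ chunkGroups (xs.drop 3)
termination_by l.length
decreasing_by simp

def func_alt (text : String) : String :=
  let hexstr : List Char := (text.toList.map hexOf).flatten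
  String.mk (chunkGroups hexstr)

-- ===== PRECONDITION & SPEC =====
def Spec_func (text : String) (out : String) : Prop := out = func_alt text
instance (text : String) (out : String) : Decidable (Spec_func text out) := by unfold Spec_func; infer_instance

-- ===== CLAIM =====
def Claim_equal_func : Prop := ∀ (text : String), Dom_func text → Spec_func text (func text)

-- ===== LEMMAS AND PROOFS =====
lemma flatten_loop (l : List Char) (acc : List Char) :
    l.foldl (fun acc i => acc ++ hexOf i) acc = acc ++ (l.map hexOf).flatten := by
  induction l generalizing acc with
  | nil => simp
  | cons x xs ih => simp [List.foldl, ih]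

lemma group_loop : ∀ n (l : List Char), l.length = n → ∀ (count : Nat) (acc : List Char),
    count % 4 = 0 →
    (l.foldl (fun (st : Nat × List Char) j =>
      (st.1 + 1, if (st.1 + 1) % 4 = 0 then st.2 ++ [j] ++ [' '] else st.2 ++ [j])) (count, acc)).2
      = acc ++ chunkGroups l := by
  intro n
  induction n using Nat.strong_induction_on with
  | _ n ih =>
    intro l hl count acc hc
    match l with
    | [] => simp [chunkGroups.eq_def]
    | [a] =>
      have h1 : (count + 1) % 4 ≠ 0 := by omega
      simp [List.foldl, chunkGroups.eq_def, h1]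
    | [a, b] =>
      have h1 : (count + 1) % 4 ≠ 0 := by omega
      have h2 : (count + 1 + 1) % 4 ≠ 0 := by omega
      simp [List.foldl, chunkGroups.eq_def, h1, h2]
    | [a, b, c] =>
      have h1 : (count + 1) % 4 ≠ 0 := by omega
      have h2 : (count + 1 + 1) % 4 ≠ 0 := by omega
      have h3 : (count + 1 + 1 + 1) % 4 ≠ 0 := by omega
      simp [List.foldl, chunkGroups.eq_def, h1, h2, h3]
    | a :: b :: c :: d :: rest =>
      have h1 : (count + 1) % 4 ≠ 0 := by omega
      have h2 : (count + 1 + 1) % 4 ≠ 0 := by omega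
      have h3 : (count + 1 + 1 + 1) % 4 ≠ 0 := by omega
      have h4 : (count + 1 + 1 + 1 + 1) % 4 = 0 := by omega
      have hlt : rest.length < n := by simp at hl; omega
      have key := ih rest.length hlt rest rfl (count + 1 + 1 + 1 + 1)
        (acc ++ [a, b, c, d, ' ']) h4
      rw [show chunkGroups (a :: b :: c :: d :: rest)
            = [a, b, c, d, ' '] ++ chunkGroups rest from by rw [chunkGroups.eq_def]; simp]
      simp only [List.foldl, h1, h2, h3, h4, if_true] at key ⊢
      simp at key ⊢
      exact key

-- ===== VERDICT =====
theorem func_spec : Claim_equal_func := by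
  unfold Claim_equal_func Spec_func func func_alt
  intro text _
  show String.mk (((text.toList.foldl (fun acc i => acc ++ hexOf i) []).foldl
      (fun (st : Nat × List Char) j =>
        (st.1 + 1, if (st.1 + 1) % 4 = 0 then st.2 ++ [j] ++ [' '] else st.2 ++ [j])) (0, [])).2)
    = String.mk (chunkGroups ((text.toList.map hexOf).flatten))
  rw [flatten_loop, List.nil_append,
    group_loop ((text.toList.map hexOf).flatten).length _ rfl 0 [] rfl, List.nil_append]
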